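-- pv_equiv track=rewrite | github.com/blank54/navi | test/activity_predecessor_completion.py | find_workdays
-- ===== SOURCE A (Python) =====
-- def find_workdays(activity_list, major_code):
--     workdays = []
--     for activity, day in activity_list.items():
--         if major_code in activity:
--             workdays.append(day)
--
--     try:
--         day_start = min(workdays)
--         day_end = max(workdays)
--     except ValueError:
--         day_start = None
--         day_end = None
--
--     return day_start, day_end
-- ===== SOURCE B (Python) =====
-- def find_workdays(activity_list, major_code):
--     day_start = None
--     day_end = None
--     for activity, day in activity_list.items():
--         if major_code in activity:
--             if day_start is None:
--                 day_start = day
--                 day_end = day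
--             else:
--                 if day < day_start:
--                     day_start = day
--                 if day > day_end:
--                     day_end = day
--     return day_start, day_end
-- ===== Notes on version B (the rewrite author's own statement) =====
-- stated objective: simpler
-- what changed: Replaced the build-a-list-then-min-then-max-with-try/except structure by a single fused pass that maintains the running (day_start, day_end) accumulator directly, with no intermediate list and no exception handling.
import Mathlib
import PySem

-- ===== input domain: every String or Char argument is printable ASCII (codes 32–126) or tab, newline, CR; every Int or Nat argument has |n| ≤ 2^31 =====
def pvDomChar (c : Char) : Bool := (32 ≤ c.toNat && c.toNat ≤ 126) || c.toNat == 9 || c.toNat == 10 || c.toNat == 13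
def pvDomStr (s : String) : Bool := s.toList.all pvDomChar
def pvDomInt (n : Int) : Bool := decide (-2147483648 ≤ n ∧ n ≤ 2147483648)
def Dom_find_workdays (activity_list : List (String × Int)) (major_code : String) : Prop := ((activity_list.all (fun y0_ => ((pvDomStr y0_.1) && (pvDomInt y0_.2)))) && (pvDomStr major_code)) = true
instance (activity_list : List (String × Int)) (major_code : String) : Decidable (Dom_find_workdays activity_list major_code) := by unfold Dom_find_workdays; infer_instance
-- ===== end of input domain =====

-- B replaces A's build-list-then-min/max-with-try/except by one fused accumulator pass (same O(n) cost, simpler).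


-- ===== PORT A =====
-- A: collect matching days into a list, then min/max (ValueError → (None, None)).
def find_workdays (activity_list : List (String × Int)) (major_code : String) : Option Int × Option Int :=
  let workdays := activity_list.foldl
    (fun ws p => if PySem.Str.isIn major_code p.1 then ws ++ [p.2] else ws) ([] : List Int)
  match PySem.List.min? workdays (fun x => x), PySem.List.max? workdays (fun x => x) with
  | some s, some e => (some s, some e)
  | _, _ => (none, none)

-- ===== PORT B =====
-- B: one pass keeping the running (day_start, day_end); both are None or both set,
-- so the accumulator is Option (Int × Int).
def find_workdays_alt (activity_list : List (String × Int)) (major_code : String) : Option Int × Option Int :=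
  let r := activity_list.foldl
    (fun acc p =>
      if PySem.Str.isIn major_code p.1 then
        match acc with
        | none => some (p.2, p.2)
        | some (s, e) => some ((if p.2 < s then p.2 else s), (if e < p.2 then p.2 else e))
      else acc)
    (none : Option (Int × Int))
  match r with
  | none => (none, none)
  | some (s, e) => (some s, some e)

-- ===== PRECONDITION & SPEC =====
def Spec_find_workdays (activity_list : List (String × Int)) (major_code : String) (out : Option Int × Option Int) : Prop := out = find_workdays_alt activity_list major_code
instance (activity_list : List (String × Int)) (major_code : String) (out : Option Int × Option Int) : Decidable (Spec_find_workdays activity_list major_code out) := by unfold Spec_find_workdays; infer_instance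

-- ===== CLAIM (what is proved, stated in full; the proofs are below) =====
def Claim_equal_find_workdays : Prop := ∀ (activity_list : List (String × Int)) (major_code : String), Dom_find_workdays activity_list major_code → Spec_find_workdays activity_list major_code (find_workdays activity_list major_code)

-- ===== LEMMAS AND PROOFS =====

-- B's accumulator encodes the min/max of A's list so far.
def pvEnc (ws : List Int) : Option (Int × Int) :=
  match ws with
  | [] => none
  | x :: t => some (t.foldl min x, t.foldl max x)

theorem pvEnc_snoc (ws : List Int) (d : Int) :
    pvEnc (ws ++ [d]) =
      match pvEnc ws with
      | none => some (d, d)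
      | some (s, e) => some ((if d < s then d else s), (if e < d then d else e)) := by
  cases ws with
  | nil => simp [pvEnc]
  | cons x t =>
    simp only [pvEnc, List.cons_append, List.foldl_append, List.foldl_cons, List.foldl_nil]
    simp only [Option.some.injEq, Prod.mk.injEq]
    constructor <;> omega

theorem pvFold_eq (major_code : String) (l : List (String × Int)) :
    ∀ ws : List Int,
      l.foldl
        (fun acc p =>
          if PySem.Str.isIn major_code p.1 then
            match acc with
            | none => some (p.2, p.2)
            | some (s, e) => some ((if p.2 < s then p.2 else s), (if e < p.2 then p.2 else e))
          else acc)
        (pvEnc ws)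
      = pvEnc (l.foldl (fun ws p => if PySem.Str.isIn major_code p.1 then ws ++ [p.2] else ws) ws) := by
  induction l with
  | nil => intro ws; simp
  | cons p t ih =>
    intro ws
    simp only [List.foldl_cons]
    by_cases h : PySem.Str.isIn major_code p.1 = true
    · rw [h]
      simp only [if_true]
      rw [← pvEnc_snoc ws p.2, ih]
    · simp only [if_neg h]
      exact ih ws

theorem pvMinMax_enc (ws : List Int) :
    (match PySem.List.min? ws (fun x => x), PySem.List.max? ws (fun x => x) with
      | some s, some e => ((some s, some e) : Option Int × Option Int)
      | _, _ => (none, none))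
    = (match pvEnc ws with
      | none => ((none, none) : Option Int × Option Int)
      | some (s, e) => (some s, some e)) := by
  cases ws with
  | nil => simp [pvEnc, PySem.List.min?, PySem.List.max?]
  | cons x t =>
    rw [PySem.List.min?_id_cons, PySem.List.max?_id_cons]
    simp [pvEnc]

-- ===== VERDICT (by name: the statement is the Claim_ definition above) =====
theorem find_workdays_spec : Claim_equal_find_workdays := by
  intro al mc _
  show find_workdays al mc = find_workdays_alt al mc
  unfold find_workdays find_workdays_alt
  have h := pvFold_eq mc al []
  simp only [pvEnc] at h
  rw [h]
  exact pvMinMax_enc _
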